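-- pv_equiv track=rewrite | github.com/hanulkimm/- | 프로그래머스/unrated/133499. 옹알이 （2）/옹알이 （2）.py | solution
-- ===== SOURCE A (Python) =====
-- def solution(babbling):
--     lst = ["aya", "ye", "woo", "ma"]
--     dct = {}
--     mx = 0
--     for word in babbling:
--         dct[word] = 0
--         mx = max(mx, len(word))
--
--     def dfs(st, used):  # 문자열, 바로 이전에 사용 문자열
--         if len(st) > mx:
--             return
--         if st in babbling:
--             dct[st] = babbling.count(st)
--         for word in lst:
--             if word != used:
--                 dfs(st + word, word)
--
--     dfs('', '')
--     answer = sum(dct.values())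
--     return answer
-- ===== SOURCE B (Python) =====
-- def solution(babbling):
--     tokens = {'a': 'aya', 'y': 'ye', 'w': 'woo', 'm': 'ma'}
--
--     def valid(w, prev=''):
--         if not w:
--             return True
--         t = tokens.get(w[0])
--         if t is None or t == prev or not w.startswith(t):
--             return False
--         return valid(w[len(t):], t)
--
--     return sum(valid(w) for w in babbling)
-- ===== Notes on version B (the rewrite author's own statement) =====
-- stated objective: faster
-- what changed: A enumerates every no-adjacent-repeat concatenation of the four babbling tokens up to the longest word's length (exponential generate-and-test into a dict); B checks each word directly by deterministic token parsing (each token starts with a distinct letter) with the no-repeat rule and sums the valid ones.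
import Mathlib
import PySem

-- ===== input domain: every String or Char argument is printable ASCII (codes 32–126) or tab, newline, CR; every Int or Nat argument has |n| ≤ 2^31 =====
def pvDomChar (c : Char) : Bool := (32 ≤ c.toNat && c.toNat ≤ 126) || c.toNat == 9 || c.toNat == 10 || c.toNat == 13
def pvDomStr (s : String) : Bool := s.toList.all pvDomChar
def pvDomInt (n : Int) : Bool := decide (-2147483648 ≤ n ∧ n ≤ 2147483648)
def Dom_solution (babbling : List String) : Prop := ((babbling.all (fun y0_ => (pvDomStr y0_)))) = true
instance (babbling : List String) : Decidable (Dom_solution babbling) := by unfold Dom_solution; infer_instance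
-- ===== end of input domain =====

-- B replaces A's exponential generate-and-test DFS over all token strings by a per-word
-- deterministic token-parsing check (each token starts with a distinct letter), linear per word.

-- ===== PORT A =====
-- dfs(st, used); Python len(s) is ported as s.toList.length (exact); the 'for word in lst'
-- loop over the 4-element literal lst is unrolled in order; the Nat fuel (mx + 2 suffices,
-- since every recursive call grows st by ≥ 2 chars and stops past mx) only makes the same
-- recursion structurally total.
def pvDfsA (bab : List String) (mx : Nat) : Nat → String → String → PySem.Dict String Int →
    PySem.Dict String Int
  | 0, _, _, d => d
  | fuel + 1, st, used, d =>
    if st.toList.length > mx then d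
    else
      let d1 := if bab.contains st then d.insert st ((PySem.List.count bab st : Int)) else d
      let d2 := if "aya" ≠ used then pvDfsA bab mx fuel (st ++ "aya") "aya" d1 else d1
      let d3 := if "ye" ≠ used then pvDfsA bab mx fuel (st ++ "ye") "ye" d2 else d2
      let d4 := if "woo" ≠ used then pvDfsA bab mx fuel (st ++ "woo") "woo" d3 else d3
      if "ma" ≠ used then pvDfsA bab mx fuel (st ++ "ma") "ma" d4 else d4

def solution (babbling : List String) : Int :=
  let p := babbling.foldl
    (fun (p : PySem.Dict String Int × Nat) word => (p.1.insert word 0, max p.2 word.toList.length))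
    (PySem.Dict.empty, 0)
  let d := pvDfsA babbling p.2 (p.2 + 2) "" "" p.1
  d.values.sum

-- ===== PORT B =====
def pvTokOf (c : Char) : Option String :=
  if c = 'a' then some "aya"
  else if c = 'y' then some "ye"
  else if c = 'w' then some "woo"
  else if c = 'm' then some "ma"
  else none

def pvValid : List Char → String → Bool
  | [], _ => true
  | c :: rest, prev =>
    match h : pvTokOf c with
    | none => false
    | some t =>
      if t = prev then false
      else if (c :: rest).take t.toList.length = t.toList then
        pvValid ((c :: rest).drop t.toList.length) t
      else false
termination_by w _ => w.length
decreasing_by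
  simp only [List.length_drop]
  simp only [pvTokOf] at h
  split_ifs at h <;> cases h <;> simp

def solution_alt (babbling : List String) : Int :=
  babbling.foldl (fun acc w => acc + (if pvValid w.toList "" then 1 else 0)) 0

-- ===== PRECONDITION & SPEC =====
def Spec_solution (babbling : List String) (out : Int) : Prop := out = solution_alt babbling
instance (babbling : List String) (out : Int) : Decidable (Spec_solution babbling out) := by
  unfold Spec_solution; infer_instance

-- ===== CLAIM (what is proved, stated in full; the proofs are below) =====
def Claim_equal_solution : Prop := ∀ (babbling : List String), Dom_solution babbling → Spec_solution babbling (solution babbling)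

-- ===== LEMMAS AND PROOFS =====

def pvCnd (bab : List String) (mx : Nat) (st used w : String) : Bool :=
  st.toList.isPrefixOf w.toList && pvValid (w.toList.drop st.toList.length) used &&
    w.toList.length ≤ mx && bab.contains w

def pvToks : List String := ["aya", "ye", "woo", "ma"]

theorem pvTok_mem {c : Char} {t : String} (h : pvTokOf c = some t) : t ∈ pvToks := by
  simp only [pvTokOf] at h
  split_ifs at h <;> cases h <;> simp [pvToks]

theorem pvValid_token (t : String) (ht : t ∈ pvToks) (rest' : List Char) (prev : String)
    (hne : t ≠ prev) : pvValid (t.toList ++ rest') prev = pvValid rest' t := by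
  fin_cases ht <;> simp [pvValid, pvTokOf, hne]

theorem pvValid_cons_elim {c : Char} {rest : List Char} {prev : String}
    (h : pvValid (c :: rest) prev = true) :
    ∃ t rest', pvTokOf c = some t ∧ t ≠ prev ∧ c :: rest = t.toList ++ rest' ∧
      pvValid rest' t = true := by
  rw [pvValid] at h
  split at h
  next => exact absurd h (by simp)
  next t htok =>
    split_ifs at h with h1 h2
    exact ⟨t, (c :: rest).drop t.toList.length, htok, h1, by
        conv_lhs => rw [← List.take_append_drop t.toList.length (c :: rest)]
        rw [h2], h⟩

theorem pvCnd_parent {bab : List String} {mx : Nat} {st used w t : String}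
    (ht : t ∈ pvToks) (hne : t ≠ used)
    (h : pvCnd bab mx (st ++ t) t w = true) : pvCnd bab mx st used w = true := by
  simp only [pvCnd, Bool.and_eq_true, List.isPrefixOf_iff_prefix, decide_eq_true_eq,
    String.toList_append, List.length_append] at h ⊢
  obtain ⟨⟨⟨hpre, hv⟩, hlen⟩, hcon⟩ := h
  obtain ⟨tail, htail⟩ := hpre
  rw [List.append_assoc] at htail
  refine ⟨⟨⟨⟨t.toList ++ tail, htail⟩, ?_⟩, hlen⟩, hcon⟩
  rw [← htail, List.drop_left, pvValid_token t ht tail used hne]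
  rw [← htail, ← List.append_assoc, ← List.length_append, List.drop_left] at hv
  exact hv

theorem pvCnd_child_of {bab : List String} {mx : Nat} {st w t : String} {rest' : List Char}
    (hpre : st.toList <+: w.toList)
    (hu : w.toList.drop st.toList.length = t.toList ++ rest')
    (hv : pvValid rest' t = true)
    (hlen : w.toList.length ≤ mx) (hcon : bab.contains w = true) :
    pvCnd bab mx (st ++ t) t w = true := by
  simp only [pvCnd, Bool.and_eq_true, List.isPrefixOf_iff_prefix, decide_eq_true_eq,
    String.toList_append, List.length_append] at *
  have hw : w.toList = st.toList ++ (t.toList ++ rest') := by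
    have htake : List.take st.toList.length w.toList = st.toList :=
      (List.prefix_iff_eq_take.mp hpre).symm
    conv_lhs => rw [← List.take_append_drop st.toList.length w.toList]
    rw [hu, htake]
  refine ⟨⟨⟨⟨rest', by rw [hw, List.append_assoc]⟩, ?_⟩, hlen⟩, hcon⟩
  rw [hw, ← List.append_assoc, ← List.length_append, List.drop_left]
  exact hv

theorem pvCnd_step {bab : List String} {mx : Nat} {st used w : String}
    (hst : st.toList.length ≤ mx) :
    pvCnd bab mx st used w = true ↔
      ("ma" ≠ used ∧ pvCnd bab mx (st ++ "ma") "ma" w = true) ∨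
      ("woo" ≠ used ∧ pvCnd bab mx (st ++ "woo") "woo" w = true) ∨
      ("ye" ≠ used ∧ pvCnd bab mx (st ++ "ye") "ye" w = true) ∨
      ("aya" ≠ used ∧ pvCnd bab mx (st ++ "aya") "aya" w = true) ∨
      (w = st ∧ bab.contains w = true) := by
  constructor
  · intro h
    have hparts := h
    simp only [pvCnd, Bool.and_eq_true, List.isPrefixOf_iff_prefix, decide_eq_true_eq] at hparts
    obtain ⟨⟨⟨hpre, hv⟩, hlen⟩, hcon⟩ := hparts
    cases hu : w.toList.drop st.toList.length with
    | nil =>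
      have hw : w.toList = st.toList := by
        have htake : List.take st.toList.length w.toList = st.toList :=
          (List.prefix_iff_eq_take.mp hpre).symm
        conv_lhs => rw [← List.take_append_drop st.toList.length w.toList]
        rw [hu, htake, List.append_nil]
      exact Or.inr (Or.inr (Or.inr (Or.inr ⟨String.toList_inj.mp hw, hcon⟩)))
    | cons c rest =>
      rw [hu] at hv
      obtain ⟨t, rest', htok, hne, hcr, hv'⟩ := pvValid_cons_elim hv
      have hchild := pvCnd_child_of hpre (hu.trans hcr) hv' hlen hcon
      have hmem := pvTok_mem htok
      fin_cases hmem
      · exact Or.inr (Or.inr (Or.inr (Or.inl ⟨hne, hchild⟩)))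
      · exact Or.inr (Or.inr (Or.inl ⟨hne, hchild⟩))
      · exact Or.inr (Or.inl ⟨hne, hchild⟩)
      · exact Or.inl ⟨hne, hchild⟩
  · rintro (⟨hne, h⟩ | ⟨hne, h⟩ | ⟨hne, h⟩ | ⟨hne, h⟩ | ⟨hw, hcon⟩)
    · exact pvCnd_parent (by simp [pvToks]) hne h
    · exact pvCnd_parent (by simp [pvToks]) hne h
    · exact pvCnd_parent (by simp [pvToks]) hne h
    · exact pvCnd_parent (by simp [pvToks]) hne h
    · subst hw
      simp only [pvCnd, Bool.and_eq_true, List.isPrefixOf_iff_prefix, decide_eq_true_eq]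
      refine ⟨⟨⟨List.prefix_refl _, ?_⟩, hst⟩, hcon⟩
      rw [List.drop_length]
      simp [pvValid]
theorem pvCnd_big {bab : List String} {mx : Nat} {st used w : String}
    (h : mx < st.toList.length) : pvCnd bab mx st used w = false := by
  by_contra hc
  rw [Bool.not_eq_false] at hc
  simp only [pvCnd, Bool.and_eq_true, List.isPrefixOf_iff_prefix, decide_eq_true_eq] at hc
  have := hc.1.1.1.length_le
  omega

theorem pvDfsA_get?_aux (bab : List String) (mx : Nat) :
    ∀ (n : Nat) (st used : String) (d : PySem.Dict String Int) (w : String),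
      mx + 1 - st.toList.length < n →
      (pvDfsA bab mx n st used d).get? w =
        if pvCnd bab mx st used w then some ((PySem.List.count bab w : Int)) else d.get? w := by
  intro n
  induction n with
  | zero => intro st used d w h; omega
  | succ n ih =>
    intro st used d w hn
    rw [pvDfsA]
    by_cases hgt : st.toList.length > mx
    · rw [if_pos hgt, pvCnd_big hgt]
      simp
    · rw [if_neg hgt]
      rw [not_lt] at hgt
      have hrec : ∀ (t : String), 0 < t.toList.length →
          ∀ dd, (pvDfsA bab mx n (st ++ t) t dd).get? w =
            if pvCnd bab mx (st ++ t) t w then some ((PySem.List.count bab w : Int))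
            else dd.get? w := by
        intro t ht dd
        apply ih
        simp only [String.toList_append, List.length_append]
        omega
      show (let d1 := if bab.contains st = true then d.insert st ((PySem.List.count bab st : Int)) else d
            let d2 := if "aya" ≠ used then pvDfsA bab mx n (st ++ "aya") "aya" d1 else d1
            let d3 := if "ye" ≠ used then pvDfsA bab mx n (st ++ "ye") "ye" d2 else d2
            let d4 := if "woo" ≠ used then pvDfsA bab mx n (st ++ "woo") "woo" d3 else d3
            if "ma" ≠ used then pvDfsA bab mx n (st ++ "ma") "ma" d4 else d4).get? w = _
      have base : (if bab.contains st = true then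
            d.insert st ((PySem.List.count bab st : Int)) else d).get? w
          = if (decide (w = st) && bab.contains w) = true
            then some ((PySem.List.count bab w : Int)) else d.get? w := by
        by_cases hc : bab.contains st = true
        · rw [if_pos hc, PySem.Dict.get?_insert]
          by_cases hw : w = st
          · subst hw; simp [hc, List.contains_iff_mem.mp hc]
          · simp [hw]
        · rw [if_neg hc]
          by_cases hw : w = st
          · subst hw
            have hm : w ∉ bab := fun hm => absurd (List.contains_iff_mem.mpr hm) hc
            simp [hc, hm]
          · simp [hw]
      have lvl : ∀ (t : String), 0 < t.toList.length → ∀ (X : PySem.Dict String Int) (Q : Bool),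
          X.get? w = (if Q = true then some ((PySem.List.count bab w : Int)) else d.get? w) →
          (if t ≠ used then pvDfsA bab mx n (st ++ t) t X else X).get? w =
            (if ((decide (t ≠ used) && pvCnd bab mx (st ++ t) t w) || Q) = true
             then some ((PySem.List.count bab w : Int)) else d.get? w) := by
        intro t ht X Q hX
        by_cases hne : t ≠ used
        · rw [if_pos hne, hrec t ht X, hX]
          by_cases hC : pvCnd bab mx (st ++ t) t w = true <;> by_cases hQ : Q = true <;>
            simp [hne, hC, hQ]
        · rw [if_neg hne, hX]
          simp only [ne_eq, Decidable.not_not] at hne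
          simp [hne]
      dsimp only
      rw [lvl "ma" (by decide) _ _ (lvl "woo" (by decide) _ _ (lvl "ye" (by decide) _ _
        (lvl "aya" (by decide) _ _ base)))]
      refine if_congr ?_ rfl rfl
      simp only [Bool.or_eq_true, Bool.and_eq_true, decide_eq_true_eq]
      exact (pvCnd_step hgt).symm

theorem pvDfsA_get? (bab : List String) (mx : Nat) (st used : String)
    (d : PySem.Dict String Int) (w : String) (fuel : Nat)
    (hf : mx + 1 - st.toList.length < fuel) :
    (pvDfsA bab mx fuel st used d).get? w =
      if pvCnd bab mx st used w then some ((PySem.List.count bab w : Int)) else d.get? w :=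
  pvDfsA_get?_aux bab mx fuel st used d w hf

theorem pvDfsA_keys_aux (bab : List String) (mx : Nat) :
    ∀ (n : Nat) (st used : String) (d : PySem.Dict String Int),
      mx + 1 - st.toList.length < n →
      (∀ x, bab.contains x = true → d.contains x = true) →
      (pvDfsA bab mx n st used d).keys = d.keys := by
  intro n
  induction n with
  | zero => intro st used d h _; omega
  | succ n ih =>
    intro st used d hn hsub
    rw [pvDfsA]
    by_cases hgt : st.toList.length > mx
    · rw [if_pos hgt]
    · rw [if_neg hgt]
      rw [not_lt] at hgt
      have base : (if bab.contains st = true then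
          d.insert st ((PySem.List.count bab st : Int)) else d).keys = d.keys := by
        by_cases hc : bab.contains st = true
        · rw [if_pos hc]
          exact PySem.Dict.keys_insert_of_contains d _ (hsub st hc)
        · rw [if_neg hc]
      have lvl : ∀ (t : String), 0 < t.toList.length → ∀ (X : PySem.Dict String Int),
          X.keys = d.keys →
          (if t ≠ used then pvDfsA bab mx n (st ++ t) t X else X).keys = d.keys := by
        intro t ht X hX
        have hsubX : ∀ x, bab.contains x = true → X.contains x = true := by
          intro x hx
          exact (PySem.Dict.contains_iff_mem_keys X x).mpr
            (hX ▸ (PySem.Dict.contains_iff_mem_keys d x).mp (hsub x hx))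
        by_cases hne : t ≠ used
        · rw [if_pos hne]
          refine (ih (st ++ t) t X ?_ hsubX).trans hX
          simp only [String.toList_append, List.length_append]
          omega
        · rw [if_neg hne]; exact hX
      dsimp only
      exact lvl "ma" (by decide) _ (lvl "woo" (by decide) _ (lvl "ye" (by decide) _
        (lvl "aya" (by decide) _ base)))

theorem pvDfsA_keys (bab : List String) (mx : Nat) (fuel : Nat) (st used : String)
    (d : PySem.Dict String Int) (hf : mx + 1 - st.toList.length < fuel)
    (hsub : ∀ x, bab.contains x = true → d.contains x = true) :
    (pvDfsA bab mx fuel st used d).keys = d.keys :=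
  pvDfsA_keys_aux bab mx fuel st used d hf hsub

theorem pvSum_zero (S : List String) (x : String) (hx : x ∉ S) :
    (S.map (fun k => if x = k then (1 : Int) else 0)).sum = 0 := by
  induction S with
  | nil => simp
  | cons y S ih =>
    simp only [List.mem_cons, not_or] at hx
    simp [List.map_cons, List.sum_cons, ih hx.2, hx.1]

theorem pvSum_one (S : List String) (x : String) (hnd : S.Nodup) (hx : x ∈ S) :
    (S.map (fun k => if x = k then (1 : Int) else 0)).sum = 1 := by
  induction S with
  | nil => simp at hx
  | cons y S ih =>
    rcases List.mem_cons.mp hx with h | h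
    · subst h
      simp [pvSum_zero S x (List.nodup_cons.mp hnd).1]
    · have hy : x ≠ y := fun he => (List.nodup_cons.mp hnd).1 (he ▸ h)
      simp only [List.map_cons, List.sum_cons]
      rw [ih (List.nodup_cons.mp hnd).2 h, if_neg hy]
      simp

theorem pvSum_count (l : List String) : ∀ (S : List String), S.Nodup → (∀ x ∈ l, x ∈ S) →
    (S.map (fun k => ((List.count k l : Nat) : Int))).sum = (l.length : Int) := by
  induction l with
  | nil => intro S _ _; simp
  | cons x l ih =>
    intro S hnd hsub
    have hsplit : (S.map (fun k => ((List.count k (x :: l) : Nat) : Int))).sum =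
        (S.map (fun k => ((List.count k l : Nat) : Int) +
          (if x = k then (1 : Int) else 0))).sum := by
      apply congrArg
      apply List.map_congr_left
      intro a _
      rw [List.count_cons]
      push_cast
      rcases eq_or_ne x a with h | h
      · simp [h]
      · simp [h, Ne.symm h]
    rw [hsplit, PySem.List.sum_map_add_int,
      ih S hnd (fun y hy => hsub y (List.mem_cons_of_mem _ hy)),
      pvSum_one S x hnd (hsub x List.mem_cons_self)]
    simp only [List.length_cons]
    push_cast
    ring

theorem pvSum_filter (bab : List String) (P : String → Bool) (S : List String)
    (hnd : S.Nodup) (hsub : ∀ x ∈ bab, x ∈ S) :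
    (S.map (fun k => if P k = true then ((List.count k bab : Nat) : Int) else 0)).sum =
      ((bab.countP P : Nat) : Int) := by
  have hpt : ∀ k, (if P k = true then ((List.count k bab : Nat) : Int) else 0) =
      ((List.count k (bab.filter P) : Nat) : Int) := by
    intro k
    by_cases hP : P k = true
    · rw [if_pos hP, List.count_filter hP]
    · rw [if_neg hP]
      rw [List.count_eq_zero.mpr (fun hm => hP (List.mem_filter.mp hm).2)]
      simp
  rw [List.map_congr_left (fun a _ => hpt a), pvSum_count (bab.filter P) S hnd
    (fun x hx => hsub x (List.mem_filter.mp hx).1), List.countP_eq_length_filter]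

theorem pvFoldl_insert_zero_get? (l : List String) : ∀ (d : PySem.Dict String Int) (x : String),
    (l.foldl (fun d x => d.insert x (0 : Int)) d).get? x = if x ∈ l then some 0 else d.get? x := by
  induction l with
  | nil => intro d x; simp
  | cons y l ih =>
    intro d x
    rw [List.foldl_cons, ih, PySem.Dict.get?_insert]
    rcases eq_or_ne x y with h | h
    · subst h
      by_cases hm : x ∈ l <;> simp [hm]
    · by_cases hm : x ∈ l <;> simp [hm, h]

theorem solution_eq_alt (bab : List String) : solution bab = solution_alt bab := by
  unfold solution
  rw [PySem.List.foldl_prod_mk (f := fun (d : PySem.Dict String Int) word => d.insert word (0 : Int))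
    (g := fun (m : Nat) word => max m word.toList.length)]
  dsimp only
  set D0 := List.foldl (fun (d : PySem.Dict String Int) word => d.insert word (0 : Int))
    PySem.Dict.empty bab with hD0
  set M := List.foldl (fun (m : Nat) word => max m word.toList.length) 0 bab with hM
  have hkeys0 : D0.keys = PySem.Set.ofList bab := by
    rw [hD0, PySem.Dict.keys_foldl_insert bab (fun _ _ => (0 : Int)) PySem.Dict.empty,
      PySem.Dict.keys_empty, PySem.Set.ofList_eq_foldl]
    rfl
  have hnd0 : D0.keys.Nodup := by rw [hkeys0]; exact PySem.Set.nodup_ofList bab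
  have hsub0 : ∀ x, bab.contains x = true → D0.contains x = true := by
    intro x hx
    refine (PySem.Dict.contains_iff_mem_keys D0 x).mpr ?_
    rw [hkeys0]
    exact (PySem.Set.mem_ofList bab x).mpr (List.contains_iff_mem.mp hx)
  have hmax : ∀ w ∈ bab, w.toList.length ≤ M :=
    (PySem.List.le_foldl_max_nat bab (fun w => w.toList.length) 0).2
  have hkeysF : (pvDfsA bab M (M + 2) "" "" D0).keys = PySem.Set.ofList bab :=
    (pvDfsA_keys bab M (M + 2) "" "" D0 (by simp) hsub0).trans hkeys0
  rw [PySem.Dict.values_eq_map_keys _ (hkeysF ▸ PySem.Set.nodup_ofList bab) 0, hkeysF]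
  have hval : ∀ k ∈ PySem.Set.ofList bab, (pvDfsA bab M (M + 2) "" "" D0).getD k 0 =
      if pvValid k.toList "" = true then ((List.count k bab : Nat) : Int) else 0 := by
    intro k hk
    have hkb : k ∈ bab := (PySem.Set.mem_ofList bab k).mp hk
    have hcnd : pvCnd bab M "" "" k = pvValid k.toList "" := by
      have hkl : k.length ≤ M := by simpa using hmax k hkb
      simp [pvCnd, hkl, hkb]
    rw [PySem.Dict.getD_eq_get?_getD, pvDfsA_get? bab M "" "" D0 k (M + 2) (by simp), hcnd]
    by_cases hv : pvValid k.toList "" = true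
    · simp [hv, PySem.List.count_eq]
    · simp only [Bool.not_eq_true] at hv
      rw [hv]
      simp only [Bool.false_eq_true, if_false]
      rw [hD0, pvFoldl_insert_zero_get? bab PySem.Dict.empty k, if_pos hkb]
      simp
  rw [List.map_congr_left hval,
    pvSum_filter bab (fun k => pvValid k.toList "") (PySem.Set.ofList bab)
      (PySem.Set.nodup_ofList bab) (fun x hx => (PySem.Set.mem_ofList bab x).mpr hx)]
  unfold solution_alt
  have hfun : (fun (acc : Int) (w : String) => acc + if pvValid w.toList "" = true then 1 else 0) =
      (fun (acc : Int) (w : String) => if pvValid w.toList "" = true then acc + 1 else acc) := by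
    funext acc w
    split_ifs <;> simp
  rw [hfun, PySem.List.foldl_if_add_one (fun w => pvValid w.toList "") bab 0]
  simp

-- ===== VERDICT (by name: the statement is the Claim_ definition above) =====
theorem solution_spec : Claim_equal_solution := by
  intro babbling _
  unfold Spec_solution
  exact solution_eq_alt babbling
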